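-- pv_equiv track=rewrite | github.com/boowerk/CodingTest-Pratice | 2026Algorithm/그리디 정리.py | solution
-- ===== SOURCE A (Python) =====
-- def solution(data):
--     """
--     ✔ 실제 시험에서 사용하는 기본 구조
--     ✔ 문제에 맞게 아래 코드 수정해서 사용
--     """
--
--     # ---------------------------------------------
--     # 예시: 기본 그리디 사용
--     # ---------------------------------------------
--     arr = data
--
--     # 정렬 방식 선택
--     arr.sort()  # or reverse=True
--
--     answer = 0
--     current = 0
--
--     for x in arr:
--         # 문제 조건에 맞게 수정
--         if current + x <= 100:
--             current += x
--             answer += 1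
--
--     return answer
-- ===== SOURCE B (Python) =====
-- def solution(data):
--     # Sort in place (same mutation as A), then build the prefix-sum table once
--     # and binary-search for the number of prefix sums <= 100.
--     data.sort()
--     prefix = []
--     total = 0
--     for x in data:
--         total += x
--         prefix.append(total)
--     lo, hi = 0, len(prefix)
--     while lo < hi:
--         mid = (lo + hi) // 2
--         if prefix[mid] > 100:
--             hi = mid
--         else:
--             lo = mid + 1
--     return lo
-- ===== Notes on version B (the rewrite author's own statement) =====
-- stated objective: alternative
-- what changed: B replaces A's incremental greedy pass (running current/answer counters) by building the prefix-sum table of the sorted list once and binary-searching it for the number of prefix sums <= 100.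
import Mathlib
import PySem

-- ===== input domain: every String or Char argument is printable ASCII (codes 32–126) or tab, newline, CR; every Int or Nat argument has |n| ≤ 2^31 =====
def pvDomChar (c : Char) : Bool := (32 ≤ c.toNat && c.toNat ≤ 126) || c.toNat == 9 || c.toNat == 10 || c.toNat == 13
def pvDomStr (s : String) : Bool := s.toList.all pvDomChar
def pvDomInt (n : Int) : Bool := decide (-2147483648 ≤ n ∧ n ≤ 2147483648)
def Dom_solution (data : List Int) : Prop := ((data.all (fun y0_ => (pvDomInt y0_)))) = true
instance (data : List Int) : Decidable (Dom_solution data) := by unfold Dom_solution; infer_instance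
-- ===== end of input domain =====

-- B replaces A's incremental greedy pass by a prefix-sum table plus a binary search
-- for the number of prefix sums ≤ 100 (objective: alternative, same asymptotic cost).
-- Both programs sort the argument list in place; the equivalence proved here is about
-- the RETURN value (both perform the same mutation).

-- ===== PORT A =====
-- arr.sort(); then the greedy loop carrying (answer, current).
def solution (data : List Int) : Int :=
  let arr := PySem.List.sorted data (fun x => x) false
  (arr.foldl (fun (s : Int × Int) x =>
      if s.2 + x ≤ 100 then (s.1 + 1, s.2 + x) else s) (0, 0)).1

-- ===== PORT B =====
-- prefix-sum table built left to right (B's `for x in data: total += x; prefix.append(total)`)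
def bPrefix : List Int → Int → List Int
  | [], _ => []
  | x :: xs, t => (t + x) :: bPrefix xs (t + x)

-- B's `while lo < hi` binary search; `prefix[mid]` is always in range in B, so getD is exact here.
def bSearch (p : List Int) (lo hi : Nat) : Nat :=
  if _h : lo < hi then
    let mid := (lo + hi) / 2
    if p.getD mid 0 > 100 then bSearch p lo mid else bSearch p (mid + 1) hi
  else lo
termination_by hi - lo
decreasing_by all_goals omega

def solution_alt (data : List Int) : Int :=
  let arr := PySem.List.sorted data (fun x => x) false
  let pre := bPrefix arr 0
  (bSearch pre 0 pre.length : Int)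

-- ===== PRECONDITION & SPEC =====
def Spec_solution (data : List Int) (out : Int) : Prop := out = solution_alt data
instance (data : List Int) (out : Int) : Decidable (Spec_solution data out) := by unfold Spec_solution; infer_instance

-- ===== CLAIM (what is proved, stated in full; the proofs are below) =====
def Claim_equal_solution : Prop := ∀ (data : List Int), Dom_solution data → Spec_solution data (solution data)

-- ===== LEMMAS AND PROOFS =====

-- abbreviation for A's loop step
def aStep (s : Int × Int) (x : Int) : Int × Int :=
  if s.2 + x ≤ 100 then (s.1 + 1, s.2 + x) else s

-- once the running total cannot accept any element, A's fold is the identity on the state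
theorem aFold_stuck (l : List Int) (a c : Int) (h : ∀ y ∈ l, ¬ (c + y ≤ 100)) :
    l.foldl aStep (a, c) = (a, c) := by
  induction l generalizing a c with
  | nil => rfl
  | cons x xs ih =>
    have hx := h x (by simp)
    simp only [List.foldl_cons, aStep, if_neg hx]
    exact ih a c (fun y hy => h y (by simp [hy]))

-- on a list of positive elements, prefix sums starting above 100 stay above 100
theorem bPrefix_big (l : List Int) (c : Int) (hc : 100 < c) (hpos : ∀ y ∈ l, 0 < y) :
    ∀ v ∈ bPrefix l c, 100 < v := by
  induction l generalizing c with
  | nil => simp [bPrefix]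
  | cons x xs ih =>
    intro v hv
    have hx : 0 < x := hpos x (by simp)
    simp only [bPrefix, List.mem_cons] at hv
    rcases hv with h | h
    · omega
    · exact ih (c + x) (by omega) (fun y hy => hpos y (by simp [hy])) v h

-- for a sorted list with current total ≤ 100, everything past the takeWhile prefix exceeds 100
theorem bPrefix_drop_big (l : List Int) (c : Int)
    (hs : l.Pairwise (· ≤ ·)) (hc : c ≤ 100) :
    ∀ v ∈ (bPrefix l c).dropWhile (fun v => decide (v ≤ 100)), 100 < v := by
  induction l generalizing c with
  | nil => simp [bPrefix]
  | cons x xs ih =>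
    rcases List.pairwise_cons.mp hs with ⟨hhead, htail⟩
    by_cases hx : c + x ≤ 100
    · simpa [bPrefix, List.dropWhile_cons, hx] using ih (c + x) htail hx
    · intro v hv
      rw [bPrefix, List.dropWhile_cons] at hv
      simp only [hx, decide_false, Bool.false_eq_true, if_false] at hv
      rcases List.mem_cons.mp hv with h | h
      · omega
      · have hxpos : 0 < x := by omega
        exact bPrefix_big xs (c + x) (by omega)
          (fun y hy => lt_of_lt_of_le hxpos (hhead y hy)) v h

-- A's greedy answer = length of the ≤-100 prefix of the prefix-sum table
theorem aFold_eq_takeWhile (l : List Int) (a c : Int)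
    (hs : l.Pairwise (· ≤ ·)) (hc : c ≤ 100) :
    (l.foldl aStep (a, c)).1 =
      a + ((bPrefix l c).takeWhile (fun v => decide (v ≤ 100))).length := by
  induction l generalizing a c with
  | nil => simp [bPrefix]
  | cons x xs ih =>
    rcases List.pairwise_cons.mp hs with ⟨hhead, htail⟩
    rw [List.foldl_cons, bPrefix, List.takeWhile_cons]
    by_cases hx : c + x ≤ 100
    · have hstep : aStep (a, c) x = (a + 1, c + x) := by simp [aStep, hx]
      rw [hstep, ih (a + 1) (c + x) htail hx]
      simp only [hx, decide_true, if_true, List.length_cons]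
      push_cast; ring
    · have hstep : aStep (a, c) x = (a, c) := by simp [aStep, hx]
      rw [hstep, aFold_stuck xs a c (fun y hy => by have := hhead y hy; omega)]
      simp [hx]

-- binary-search correctness on a 100-partitioned list
theorem bSearch_eq (p : List Int) (k : Nat)
    (_hk : k ≤ p.length)
    (hlow : ∀ i < k, p.getD i 0 ≤ 100)
    (hhigh : ∀ j, k ≤ j → j < p.length → 100 < p.getD j 0) :
    ∀ lo hi, lo ≤ k → k ≤ hi → hi ≤ p.length → bSearch p lo hi = k := by
  intro lo hi
  induction hn : hi - lo using Nat.strong_induction_on generalizing lo hi with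
  | _ n ih =>
    intro hlo hhi hhl
    rw [bSearch]
    by_cases h : lo < hi
    · rw [dif_pos h]
      set mid := (lo + hi) / 2 with hmid
      have h1 : lo ≤ mid := by omega
      have h2 : mid < hi := by omega
      by_cases hbig : p.getD mid 0 > 100
      · have hkm : k ≤ mid := by
          by_contra hcon
          exact absurd (hlow mid (by omega)) (by omega)
        rw [if_pos hbig]
        exact ih (mid - lo) (by omega) lo mid rfl hlo hkm (by omega)
      · have hkm : mid < k := by
          by_contra hcon
          exact absurd (hhigh mid (by omega) (by omega)) (by omega)
        rw [if_neg hbig]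
        exact ih (hi - (mid + 1)) (by omega) (mid + 1) hi rfl (by omega) hhi hhl
    · rw [dif_neg h]; omega

-- ===== VERDICT (by name: the statement is the Claim_ definition above) =====
theorem solution_spec : Claim_equal_solution := by
  intro data _
  unfold Spec_solution solution solution_alt
  set arr := PySem.List.sorted data (fun x => x) false with harr
  have hs : arr.Pairwise (· ≤ ·) := by
    simpa using PySem.List.sorted_pairwise data (fun x => x)
  set p := bPrefix arr 0 with hp
  set k := (p.takeWhile (fun v => decide (v ≤ 100))).length with hk
  have hsplit : p.takeWhile (fun v => decide (v ≤ 100)) ++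
      p.dropWhile (fun v => decide (v ≤ 100)) = p := List.takeWhile_append_dropWhile
  have hklen : k ≤ p.length := by
    have := congrArg List.length hsplit
    rw [List.length_append] at this
    omega
  have hdrop := bPrefix_drop_big arr 0 hs (by norm_num)
  have hlow : ∀ i < k, p.getD i 0 ≤ 100 := by
    intro i hi
    have hip : i < p.length := lt_of_lt_of_le hi hklen
    have : p.getD i 0 = (p.takeWhile (fun v => decide (v ≤ 100))).getD i 0 := by
      conv_lhs => rw [← hsplit]
      rw [List.getD_eq_getElem?_getD, List.getD_eq_getElem?_getD,
        List.getElem?_append_left (by omega)]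
    rw [this, List.getD_eq_getElem?_getD, List.getElem?_eq_getElem (by omega)]
    have hmem : (p.takeWhile (fun v => decide (v ≤ 100)))[i] ∈
        p.takeWhile (fun v => decide (v ≤ 100)) := List.getElem_mem _
    have := List.mem_takeWhile_imp hmem
    simpa using this
  have hhigh : ∀ j, k ≤ j → j < p.length → 100 < p.getD j 0 := by
    intro j hj hjp
    have hlen2 : (p.dropWhile (fun v => decide (v ≤ 100))).length = p.length - k := by
      have h2 := congrArg List.length hsplit
      rw [List.length_append] at h2
      omega
    have hkk : (p.takeWhile (fun v => decide (v ≤ 100))).length = k := hk.symm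
    have : p.getD j 0 = (p.dropWhile (fun v => decide (v ≤ 100))).getD (j - k) 0 := by
      conv_lhs => rw [← hsplit]
      rw [List.getD_eq_getElem?_getD, List.getD_eq_getElem?_getD,
        List.getElem?_append_right (by rw [hkk]; exact hj), hkk]
    rw [this, List.getD_eq_getElem?_getD,
      List.getElem?_eq_getElem (by rw [hlen2]; omega)]
    exact hdrop _ (List.getElem_mem _)
  have hb := bSearch_eq p k hklen hlow hhigh 0 p.length (Nat.zero_le _) hklen le_rfl
  have ha := aFold_eq_takeWhile arr 0 0 hs (by norm_num)
  show (arr.foldl aStep (0, 0)).1 = ((bSearch p 0 p.length : Nat) : Int)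
  rw [ha, hb, hk, hp]
  omega
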